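-- pv_equiv track=rewrite | github.com/ulyana-3107/Studying | Recursion/ladders2.py | ladders
-- ===== SOURCE A (Python) =====
-- def ladders(n, curr=[]):
--     if sum(curr) == n:
--         return [curr]
--     elif sum(curr) > n:
--         return []
--     else:
--         res = []
--         for i in range(curr[-1] + 1 if curr else 1, n + 1):
--             res += ladders(n, curr + [i])
--         return res
-- ===== SOURCE B (Python) =====
-- def _distinct(remaining, start, cap):
--     # suffixes: strictly increasing ints >= start, each <= cap, summing to remaining
--     if remaining == 0:
--         return [[]]
--     res = []
--     for i in range(start, min(remaining, cap) + 1):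
--         for tail in _distinct(remaining - i, i + 1, cap):
--             res.append([i] + tail)
--     return res
--
-- def ladders(n, curr=[]):
--     s = sum(curr)
--     if s == n:
--         return [curr]
--     if s > n:
--         return []
--     start = curr[-1] + 1 if curr else 1
--     return [curr + tail for tail in _distinct(n - s, start, n)]
-- ===== Notes on version B (the rewrite author's own statement) =====
-- stated objective: alternative
-- what changed: Replaces A's grow-the-prefix recursion (threading curr, re-summing it at every node, and looping i all the way to n with overshoot pruned one level deeper) by a suffix-building helper over the shrinking remaining budget whose loop is capped at min(remaining, n), with the prefix prepended once at the top.
import Mathlib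
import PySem

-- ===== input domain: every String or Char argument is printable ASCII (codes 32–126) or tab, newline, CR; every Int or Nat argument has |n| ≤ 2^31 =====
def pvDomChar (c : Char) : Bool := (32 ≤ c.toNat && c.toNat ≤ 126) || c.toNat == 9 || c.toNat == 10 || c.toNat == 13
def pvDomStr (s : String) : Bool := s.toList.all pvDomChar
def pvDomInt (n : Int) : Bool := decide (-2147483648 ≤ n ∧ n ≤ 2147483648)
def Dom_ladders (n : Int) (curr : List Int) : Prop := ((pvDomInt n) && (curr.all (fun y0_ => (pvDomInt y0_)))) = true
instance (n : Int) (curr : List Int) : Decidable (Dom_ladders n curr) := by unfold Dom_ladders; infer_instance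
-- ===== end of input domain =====

-- B rebuilds the sequences suffix-first over the shrinking remaining budget with the loop
-- capped at min(remaining, n), instead of A's grow-the-prefix recursion looping up to n.

-- Termination potentials (used by both ports' decreasing_by; appended values are strictly
-- increasing, so a quadratic potential in the negative part of the lower bound decreases).
def pvPhi (last : Int) : Int := if 1 ≤ last then 0 else (1 - last) * (2 - last)

def pvMeasA (n : Int) (curr : List Int) : Nat :=
  (n - curr.sum + pvPhi (curr.getLast?.getD 0)).toNat

lemma pvPhi_nonneg (x : Int) : 0 ≤ pvPhi x := by
  unfold pvPhi; split <;> nlinarith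

lemma pvMeasA_dec {n s L i : Int} (hs : s < n) (hi : L + 1 ≤ i) :
    (n - (s + i) + pvPhi i).toNat < (n - s + pvPhi L).toNat := by
  have hL := pvPhi_nonneg L
  have hpos : 0 < n - s + pvPhi L := by omega
  rw [Int.toNat_lt_toNat hpos]
  unfold pvPhi
  split_ifs <;> nlinarith

def pvPsi (start : Int) : Int := if 2 ≤ start then 0 else (2 - start) * (3 - start)

def pvMeasB (remaining start : Int) : Nat := (remaining + pvPsi start).toNat

lemma pvMeasB_dec {remaining start i : Int} (hsi : start ≤ i) (hir : i ≤ remaining) :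
    (remaining - i + pvPsi (i + 1)).toNat < (remaining + pvPsi start).toNat := by
  have hpos : 0 < remaining + pvPsi start := by
    unfold pvPsi; split <;> nlinarith
  rw [Int.toNat_lt_toNat hpos]
  unfold pvPsi
  split_ifs <;> nlinarith

-- ===== PORT A =====
def ladders (n : Int) (curr : List Int) : List (List Int) :=
  if curr.sum = n then [curr]
  else if curr.sum > n then []
  else
    (PySem.List.pyRange (if curr.isEmpty then 1 else curr.getLast?.getD 0 + 1) (n + 1) 1).attach.foldl
      (fun res i => res ++ ladders n (curr ++ [i.1])) []
termination_by pvMeasA n curr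
decreasing_by
  rename_i h1 h2
  obtain ⟨j, hj⟩ := i
  have hmem := (PySem.List.mem_pyRange_one).mp hj
  show pvMeasA n (curr ++ [j]) < pvMeasA n curr
  unfold pvMeasA
  rw [List.sum_append, List.sum_cons, List.sum_nil, List.getLast?_concat, Option.getD_some]
  simp only [add_zero]
  apply pvMeasA_dec (by omega)
  by_cases he : curr.isEmpty = true
  · have hc : curr = [] := List.isEmpty_iff.mp he
    subst hc; simpa using hmem.1
  · rw [dif_neg he] at hmem; exact hmem.1

-- ===== PORT B =====
def distinctLadders (remaining start cap : Int) : List (List Int) :=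
  if remaining = 0 then [[]]
  else
    (PySem.List.pyRange start (min remaining cap + 1) 1).attach.foldl
      (fun res i =>
        (distinctLadders (remaining - i.1) (i.1 + 1) cap).foldl
          (fun res2 tail => res2 ++ [i.1 :: tail]) res) []
termination_by pvMeasB remaining start
decreasing_by
  obtain ⟨j, hj⟩ := i
  have hmem := (PySem.List.mem_pyRange_one).mp hj
  have hmin : min remaining cap ≤ remaining := min_le_left _ _
  show pvMeasB (remaining - j) (j + 1) < pvMeasB remaining start
  exact pvMeasB_dec hmem.1 (by omega)

def ladders_alt (n : Int) (curr : List Int) : List (List Int) :=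
  let s := curr.sum
  if s = n then [curr]
  else if s > n then []
  else
    let start := if curr.isEmpty then 1 else curr.getLast?.getD 0 + 1
    (distinctLadders (n - s) start n).map (fun tail => curr ++ tail)

-- ===== PRECONDITION & SPEC =====
-- Pre_ excludes exactly the inputs on which CPython raises RecursionError: when sum(curr) < n,
-- A nests one call per appended value (each strictly above the previous, all at most n), so the
-- call depth is the length of the first dive start, start+1, ... (start = curr[-1]+1, or 1)
-- until the running sum overshoots n, and never more than n - curr[-1]; when that depth reaches
-- the interpreter's recursion limit, A raises.  The margin below the exact limit additionally
-- excludes only inputs whose ≥9000-deep dive does not terminate in observable time, not inputs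
-- on which A returns a value.
def Pre_ladders (n : Int) (curr : List Int) : Prop :=
  n ≤ curr.sum ∨ n - curr.sum < 9000 * (curr.getLast?.getD 0 + 1) + 40495500
    ∨ n - curr.getLast?.getD 0 < 8990
instance (n : Int) (curr : List Int) : Decidable (Pre_ladders n curr) := by unfold Pre_ladders; infer_instance
def pvWitness_ladders : Int × List Int := (6, [])

def Spec_ladders (n : Int) (curr : List Int) (out : List (List Int)) : Prop := out = ladders_alt n curr
instance (n : Int) (curr : List Int) (out : List (List Int)) : Decidable (Spec_ladders n curr out) := by unfold Spec_ladders; infer_instance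

-- ===== CLAIM (what is proved, stated in full; the proofs are below) =====
def Claim_equal_ladders : Prop := ∀ (n : Int) (curr : List Int), Dom_ladders n curr → Pre_ladders n curr → Spec_ladders n curr (ladders n curr)

-- ===== LEMMAS AND PROOFS =====

lemma start_eq (curr : List Int) :
    (if curr.isEmpty then 1 else curr.getLast?.getD 0 + 1) = curr.getLast?.getD 0 + 1 := by
  cases curr <;> simp

lemma ladders_nil_of_gt {n : Int} {curr : List Int} (h : curr.sum > n) :
    ladders n curr = [] := by
  rw [ladders]
  rw [if_neg (by omega), if_pos h]

lemma distinct_zero (start cap : Int) : distinctLadders 0 start cap = [[]] := by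
  rw [distinctLadders]; simp

lemma sum_concat (curr : List Int) (i : Int) : (curr ++ [i]).sum = curr.sum + i := by
  simp

lemma core (n : Int) : ∀ (k : Nat) (curr : List Int), pvMeasA n curr < k → curr.sum < n →
    ladders n curr
      = (distinctLadders (n - curr.sum) (curr.getLast?.getD 0 + 1) n).map (fun t => curr ++ t) := by
  intro k
  induction k with
  | zero => intro curr h _; omega
  | succ k ih =>
    intro curr hk hs
    have hminchoice := min_choice (n - curr.sum) n
    have hA : ladders n curr
        = (PySem.List.pyRange (curr.getLast?.getD 0 + 1) (n + 1) 1).flatMap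
            (fun i => ladders n (curr ++ [i])) := by
      rw [ladders, if_neg (by omega), if_neg (by omega), start_eq,
          List.foldl_attach (f := fun res i => res ++ ladders n (curr ++ [i])),
          PySem.List.foldl_append_eq_flatMap, List.nil_append]
    have hB : distinctLadders (n - curr.sum) (curr.getLast?.getD 0 + 1) n
        = (PySem.List.pyRange (curr.getLast?.getD 0 + 1) (min (n - curr.sum) n + 1) 1).flatMap
            (fun i => (distinctLadders (n - curr.sum - i) (i + 1) n).map (fun t => i :: t)) := by
      rw [distinctLadders, if_neg (by omega)]
      simp only [PySem.List.foldl_append_singleton_eq_map]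
      rw [List.foldl_attach
            (f := fun res i => res ++ (distinctLadders (n - curr.sum - i) (i + 1) n).map (fun t => i :: t)),
          PySem.List.foldl_append_eq_flatMap, List.nil_append]
    -- pointwise agreement on the live part of the range
    have hpt : ∀ i, curr.getLast?.getD 0 + 1 ≤ i → i ≤ n - curr.sum →
        ladders n (curr ++ [i])
          = (distinctLadders (n - curr.sum - i) (i + 1) n).map (fun t => curr ++ i :: t) := by
      intro i hSi hir
      rcases eq_or_lt_of_le hir with he | hlt
      · have h0 : n - curr.sum - i = 0 := by omega
        rw [h0, distinct_zero, ladders, if_pos (by rw [sum_concat]; omega)]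
        simp
      · have hdec : pvMeasA n (curr ++ [i]) < pvMeasA n curr := by
          unfold pvMeasA
          rw [sum_concat, List.getLast?_concat, Option.getD_some]
          exact pvMeasA_dec hs hSi
        have hrec := ih (curr ++ [i]) (by omega) (by rw [sum_concat]; omega)
        rw [sum_concat, List.getLast?_concat, Option.getD_some] at hrec
        have hsub : n - (curr.sum + i) = n - curr.sum - i := by ring
        rw [hsub] at hrec
        rw [hrec]
        exact List.map_congr_left (fun t _ => by simp)
    -- dead part of A's range produces []
    have hdead : ∀ i, min (n - curr.sum) n + 1 ≤ i → i < n + 1 →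
        ladders n (curr ++ [i]) = [] := by
      intro i h1 h2
      apply ladders_nil_of_gt
      rw [sum_concat]
      rcases hminchoice with hm | hm <;> omega
    rw [hA, hB, List.map_flatMap]
    rcases le_or_gt (curr.getLast?.getD 0 + 1) (min (n - curr.sum) n + 1) with hle | hgt
    · rw [PySem.List.pyRange_one_append (curr.getLast?.getD 0 + 1) (min (n - curr.sum) n + 1)
          (n + 1) hle (by rcases hminchoice with hm | hm <;> omega), List.flatMap_append]
      have hd : (PySem.List.pyRange (min (n - curr.sum) n + 1) (n + 1) 1).flatMap
          (fun i => ladders n (curr ++ [i])) = [] := by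
        rw [List.flatMap_eq_nil_iff]
        intro i hi
        have hm := (PySem.List.mem_pyRange_one).mp hi
        exact hdead i hm.1 hm.2
      rw [hd, List.append_nil]
      simp only [List.flatMap_def]
      apply congrArg
      apply List.map_congr_left
      intro i hi
      have hm := (PySem.List.mem_pyRange_one).mp hi
      have hmin := min_le_left (n - curr.sum) n
      have hir : i ≤ n - curr.sum := by omega
      rw [List.map_map, hpt i hm.1 hir]
      rfl
    · rw [PySem.List.pyRange_one_eq_nil (a := curr.getLast?.getD 0 + 1)
            (b := min (n - curr.sum) n + 1) (by omega)]
      rw [List.flatMap_nil, List.flatMap_eq_nil_iff]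
      intro i hi
      have hm := (PySem.List.mem_pyRange_one).mp hi
      exact hdead i (by omega) hm.2

theorem ladders_eq_alt (n : Int) (curr : List Int) : ladders n curr = ladders_alt n curr := by
  unfold ladders_alt
  simp only [start_eq]
  rcases lt_trichotomy curr.sum n with h | h | h
  · rw [if_neg (by omega), if_neg (by omega)]
    exact core n (pvMeasA n curr + 1) curr (by omega) h
  · rw [ladders, if_pos h, if_pos h]
  · rw [if_neg (by omega), if_pos h, ladders_nil_of_gt h]

-- ===== VERDICT (by name: the statement is the Claim_ definition above) =====
theorem ladders_spec : Claim_equal_ladders := by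
  intro n curr _ _
  unfold Spec_ladders
  exact ladders_eq_alt n curr
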